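-- pv_equiv track=rewrite | github.com/Leewonchan14/CodingTest | 백준/Gold/14502. 연구소/연구소.py | combi3
-- ===== SOURCE A (Python) =====
-- def combi3(arr):
--     result = []
--     li = []
--
--     def recur():
--         if len(li) == 3:
--             result.append(set(arr[i] for i in li))
--             return
--
--         for i in range(len(arr)):
--             if not li or i > li[-1]:
--                 li.append(i)
--                 recur()
--                 li.pop()
--
--     recur()
--     return result
-- ===== SOURCE B (Python) =====
-- def combi3(arr):
--     result = []
--     n = len(arr)
--     for i in range(n):
--         for j in range(i + 1, n):
--             for k in range(j + 1, n):
--                 result.append({arr[i], arr[j], arr[k]})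
--     return result
-- ===== Notes on version B (the rewrite author's own statement) =====
-- stated objective: simpler
-- what changed: Replaces the recursive backtracking with a mutable index list by three flat nested loops over index triples i<j<k, appending each set directly.
import Mathlib
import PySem

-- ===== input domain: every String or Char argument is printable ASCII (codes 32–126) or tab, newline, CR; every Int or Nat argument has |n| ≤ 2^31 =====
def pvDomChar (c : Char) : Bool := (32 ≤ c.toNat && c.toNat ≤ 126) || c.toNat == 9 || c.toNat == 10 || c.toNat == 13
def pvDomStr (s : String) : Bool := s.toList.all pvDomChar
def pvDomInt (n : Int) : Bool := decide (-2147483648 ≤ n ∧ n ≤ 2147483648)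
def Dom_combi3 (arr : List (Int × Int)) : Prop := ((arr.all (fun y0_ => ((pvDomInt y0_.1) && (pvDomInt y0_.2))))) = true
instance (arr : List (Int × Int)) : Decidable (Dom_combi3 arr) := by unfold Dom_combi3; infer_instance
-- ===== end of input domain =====

-- B replaces A's recursive backtracking (mutable index list) by three flat nested loops over i<j<k; objective: simpler.


-- ===== PORT A =====
-- fuel bounds the recursion depth (li never exceeds length 3, so fuel 4 is never exhausted)
def combi3Go (arr : List (Int × Int)) : Nat → List Int → List (List (Int × Int)) → List (List (Int × Int))
  | 0, _, result => result
  | fuel + 1, li, result =>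
    if li.length = 3 then
      result ++ [PySem.Set.ofList (li.map (fun i => PySem.List.pyGetD arr i (0, 0)))]
    else
      (PySem.List.pyRange 0 (arr.length : Int) 1).foldl
        (fun acc i =>
          if li.getLast?.all (fun j => decide (j < i)) then
            combi3Go arr fuel (li ++ [i]) acc
          else acc)
        result

def combi3 (arr : List (Int × Int)) : List (List (Int × Int)) :=
  combi3Go arr 4 [] []

-- ===== PORT B =====
def combi3_alt (arr : List (Int × Int)) : List (List (Int × Int)) :=
  let n : Int := (arr.length : Int)
  (PySem.List.pyRange 0 n 1).foldl (fun acc i =>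
    (PySem.List.pyRange (i + 1) n 1).foldl (fun acc j =>
      (PySem.List.pyRange (j + 1) n 1).foldl (fun acc k =>
        acc ++ [PySem.Set.ofList
          [PySem.List.pyGetD arr i (0, 0), PySem.List.pyGetD arr j (0, 0),
           PySem.List.pyGetD arr k (0, 0)]]) acc) acc) []

-- ===== PRECONDITION & SPEC =====
def Spec_combi3 (arr : List (Int × Int)) (out : List (List (Int × Int))) : Prop := out = combi3_alt arr
instance (arr : List (Int × Int)) (out : List (List (Int × Int))) : Decidable (Spec_combi3 arr out) := by unfold Spec_combi3; infer_instance

-- ===== CLAIM (what is proved, stated in full; the proofs are below) =====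
def Claim_equal_combi3 : Prop := ∀ (arr : List (Int × Int)), Dom_combi3 arr → Spec_combi3 arr (combi3 arr)

-- ===== LEMMAS AND PROOFS =====

-- a guarded fold does nothing when the guard is false on every element
theorem foldl_if_false {β : Type} (l : List Int) (p : Int → Bool)
    (f : β → Int → β) (init : β) (h : ∀ x ∈ l, p x = false) :
    l.foldl (fun acc x => if p x then f acc x else acc) init = init := by
  induction l generalizing init with
  | nil => rfl
  | cons a t ih =>
    simp only [List.foldl_cons, h a (by simp)]
    exact ih init (fun x hx => h x (by simp [hx]))

-- folding range(0,n) with guard (i < ·) equals folding range(i+1,n)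
theorem foldl_guard_range {β : Type} (n i : Int) (hi : 0 ≤ i)
    (f : β → Int → β) (init : β) :
    (PySem.List.pyRange 0 n 1).foldl
      (fun acc x => if decide (i < x) then f acc x else acc) init
    = (PySem.List.pyRange (i + 1) n 1).foldl f init := by
  by_cases hn : n ≤ i + 1
  · rw [PySem.List.pyRange_one_eq_nil hn]
    simp only [List.foldl_nil]
    apply foldl_if_false
    intro x hx
    rw [PySem.List.mem_pyRange_one] at hx
    simp only [decide_eq_false_iff_not, not_lt]
    omega
  · rw [not_le] at hn
    rw [PySem.List.pyRange_one_append 0 (i + 1) n (by omega) (by omega),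
        List.foldl_append]
    have h1 : (PySem.List.pyRange 0 (i + 1) 1).foldl
        (fun acc x => if decide (i < x) then f acc x else acc) init = init := by
      apply foldl_if_false
      intro x hx
      rw [PySem.List.mem_pyRange_one] at hx
      simp only [decide_eq_false_iff_not, not_lt]
      omega
    rw [h1]
    apply PySem.List.foldl_congr_mem
    intro acc x hx
    rw [PySem.List.mem_pyRange_one] at hx
    rw [if_pos (by simp; omega)]

theorem combi3Go_eq (arr : List (Int × Int)) :
    combi3Go arr 4 [] [] = combi3_alt arr := by
  show combi3Go arr 4 [] [] = _
  rw [combi3Go]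
  simp only [List.length_nil, List.getLast?_nil, Option.all_none, if_true,
    show (0 : Nat) ≠ 3 from by decide, if_false, List.nil_append]
  unfold combi3_alt
  apply PySem.List.foldl_congr_mem
  intro acc i hi
  rw [PySem.List.mem_pyRange_one] at hi
  rw [combi3Go]
  simp only [List.nil_append, List.length_cons, List.length_nil,
    show ([i] : List Int).getLast? = some i from rfl, Option.all_some,
    show (1 : Nat) ≠ 3 from by decide, if_false]
  rw [foldl_guard_range _ i hi.1]
  apply PySem.List.foldl_congr_mem
  intro acc2 j hj
  rw [PySem.List.mem_pyRange_one] at hj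
  rw [combi3Go]
  simp only [List.singleton_append, List.length_cons, List.length_nil, Option.all_some,
    show (2 : Nat) ≠ 3 from by decide, if_false,
    show [i, j].getLast? = some j from rfl]
  rw [foldl_guard_range _ j (by omega)]
  apply PySem.List.foldl_congr_mem
  intro acc3 k hk
  rfl

-- ===== VERDICT (by name: the statement is the Claim_ definition above) =====
theorem combi3_spec : Claim_equal_combi3 := by
  intro arr _
  unfold Spec_combi3 combi3
  exact combi3Go_eq arr
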